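-- pv_equiv track=rewrite | github.com/chengdashia/DNN-RAPS | scientific_research_drawing/tradition.py | find_optimal_states
-- ===== SOURCE A (Python) =====
-- def find_optimal_states(num_episodes, states, derivative_states_x, derivative_states_y, target_state):
--     optimal_states_x = []  # 初始化最优状态的 x 坐标列表
--     optimal_states_y = []  # 初始化最优状态的 y 坐标列表
--     for i in range(num_episodes):  # 遍历每个训练周期
--         original_point = states[i]  # 获取当前周期的原始点
--         derivative_points = [y for x, y in zip(derivative_states_x, derivative_states_y) if x == i]  # 获取当前周期的所有衍生点
--         all_points = [original_point] + derivative_points  # 合并原始点和衍生点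
--         optimal_point = min(all_points, key=lambda y: abs(y - target_state))  # 找出距离目标状态最近的点
--         optimal_states_x.append(i)  # 添加最优点的 x 坐标
--         optimal_states_y.append(optimal_point)  # 添加最优点的 y 坐标
--     return optimal_states_x, optimal_states_y  # 返回最优状态的坐标列表
-- ===== SOURCE B (Python) =====
-- def find_optimal_states(num_episodes, states, derivative_states_x, derivative_states_y, target_state):
--     # single pass over the derivative points, keeping a running best per episode
--     best_y = [states[i] for i in range(num_episodes)]
--     for x, y in zip(derivative_states_x, derivative_states_y):
--         if 0 <= x < num_episodes and abs(y - target_state) < abs(best_y[x] - target_state):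
--             best_y[x] = y
--     return list(range(num_episodes)), best_y
-- ===== Notes on version B (the rewrite author's own statement) =====
-- stated objective: faster
-- what changed: Instead of rescanning the whole derivative list once per episode (nested passes), B makes one pass over the derivative points, updating a per-episode running minimum; ties are preserved because only a strictly closer point replaces the current best.
import Mathlib
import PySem

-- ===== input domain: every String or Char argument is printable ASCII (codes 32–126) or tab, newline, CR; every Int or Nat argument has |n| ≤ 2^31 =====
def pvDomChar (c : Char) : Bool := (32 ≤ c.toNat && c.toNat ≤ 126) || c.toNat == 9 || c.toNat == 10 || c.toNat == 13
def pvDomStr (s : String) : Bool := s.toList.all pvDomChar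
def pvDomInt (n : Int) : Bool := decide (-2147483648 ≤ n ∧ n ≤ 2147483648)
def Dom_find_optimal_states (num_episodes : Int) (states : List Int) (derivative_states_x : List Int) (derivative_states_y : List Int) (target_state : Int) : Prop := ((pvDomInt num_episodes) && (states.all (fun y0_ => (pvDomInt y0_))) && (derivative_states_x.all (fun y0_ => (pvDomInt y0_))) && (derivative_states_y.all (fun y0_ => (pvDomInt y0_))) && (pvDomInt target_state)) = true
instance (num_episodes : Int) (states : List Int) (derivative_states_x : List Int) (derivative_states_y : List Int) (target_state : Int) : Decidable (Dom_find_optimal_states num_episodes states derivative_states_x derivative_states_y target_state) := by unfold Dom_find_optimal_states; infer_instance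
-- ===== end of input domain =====

-- B replaces A's per-episode rescans of the derivative list by a single pass keeping a
-- running per-episode best (asymptotically faster); return values proved equal on Pre_.

-- ===== PORT A =====

-- min(all_points, key=lambda y: abs(y - target_state)): left-to-right, keep first minimum
def fosMin (t : Int) (best : Int) : List Int → Int
  | [] => best
  | y :: ys => if (y - t).natAbs < (best - t).natAbs then fosMin t y ys else fosMin t best ys

def find_optimal_states (num_episodes : Int) (states : List Int) (derivative_states_x : List Int) (derivative_states_y : List Int) (target_state : Int) : List Int × List Int :=
  (PySem.List.pyRange 0 num_episodes 1).foldl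
    (fun acc i =>
      let original_point := PySem.List.pyGetD states i 0  -- in range under Pre_
      let derivative_points := ((derivative_states_x.zip derivative_states_y).filter (fun p => p.1 == i)).map Prod.snd
      let optimal_point := fosMin target_state original_point derivative_points
      (acc.1 ++ [i], acc.2 ++ [optimal_point]))
    ([], [])

-- ===== PORT B =====

-- one derivative point: overwrite the running best of its episode if strictly closer
def fosStep (t n : Int) (b : List Int) (p : Int × Int) : List Int :=
  if 0 ≤ p.1 ∧ p.1 < n ∧ (p.2 - t).natAbs < ((b.getD p.1.toNat 0) - t).natAbs
  then b.set p.1.toNat p.2 else b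

def find_optimal_states_alt (num_episodes : Int) (states : List Int) (derivative_states_x : List Int) (derivative_states_y : List Int) (target_state : Int) : List Int × List Int :=
  let best_y := (PySem.List.pyRange 0 num_episodes 1).map (fun i => PySem.List.pyGetD states i 0)
  (PySem.List.pyRange 0 num_episodes 1,
   (derivative_states_x.zip derivative_states_y).foldl (fosStep target_state num_episodes) best_y)

-- ===== PRECONDITION & SPEC =====
-- Pre_ excludes num_episodes > len(states), where Python A (and B) raise IndexError.
def Pre_find_optimal_states (num_episodes : Int) (states : List Int) (derivative_states_x : List Int) (derivative_states_y : List Int) (target_state : Int) : Prop :=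
  num_episodes ≤ (states.length : Int)
instance (num_episodes : Int) (states : List Int) (derivative_states_x : List Int) (derivative_states_y : List Int) (target_state : Int) : Decidable (Pre_find_optimal_states num_episodes states derivative_states_x derivative_states_y target_state) := by unfold Pre_find_optimal_states; infer_instance

def pvWitness_find_optimal_states : Int × List Int × List Int × List Int × Int := (2, [3, 9], [0, 1, 0], [4, 8, 2], 3)

def Spec_find_optimal_states (num_episodes : Int) (states : List Int) (derivative_states_x : List Int) (derivative_states_y : List Int) (target_state : Int) (out : List Int × List Int) : Prop := out = find_optimal_states_alt num_episodes states derivative_states_x derivative_states_y target_state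
instance (num_episodes : Int) (states : List Int) (derivative_states_x : List Int) (derivative_states_y : List Int) (target_state : Int) (out : List Int × List Int) : Decidable (Spec_find_optimal_states num_episodes states derivative_states_x derivative_states_y target_state out) := by unfold Spec_find_optimal_states; infer_instance

-- ===== CLAIM (what is proved, stated in full; the proofs are below) =====
def Claim_equal_find_optimal_states : Prop := ∀ (num_episodes : Int) (states : List Int) (derivative_states_x : List Int) (derivative_states_y : List Int) (target_state : Int), Dom_find_optimal_states num_episodes states derivative_states_x derivative_states_y target_state → Pre_find_optimal_states num_episodes states derivative_states_x derivative_states_y target_state → Spec_find_optimal_states num_episodes states derivative_states_x derivative_states_y target_state (find_optimal_states num_episodes states derivative_states_x derivative_states_y target_state)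

-- ===== LEMMAS AND PROOFS =====

-- A's accumulator shape: appending (i, g i) pairs is a map
theorem fos_foldl_append (g : Int → Int) (L : List Int) (xs ys : List Int) :
    L.foldl (fun acc i => (acc.1 ++ [i], acc.2 ++ [g i])) (xs, ys) = (xs ++ L, ys ++ L.map g) := by
  induction L generalizing xs ys with
  | nil => simp
  | cons a L ih => simpa using ih (xs ++ [a]) (ys ++ [g a])

theorem fosStep_length (t n : Int) (L : List (Int × Int)) (b : List Int) :
    (L.foldl (fosStep t n) b).length = b.length := by
  induction L generalizing b with
  | nil => rfl
  | cons p L ih => rw [List.foldl_cons, ih]; unfold fosStep; split <;> simp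

-- B's running minimum at episode i equals A's fosMin over the i-filtered derivative points
theorem fosStep_getD (t n : Int) (L : List (Int × Int)) (b : List Int) (i : Nat)
    (hb : i < b.length) (hn : (i : Int) < n) :
    (L.foldl (fosStep t n) b).getD i 0 =
      fosMin t (b.getD i 0) ((L.filter (fun p => p.1 == (i : Int))).map Prod.snd) := by
  induction L generalizing b with
  | nil => rfl
  | cons p L ih =>
    rw [List.foldl_cons]
    by_cases hp : p.1 = (i : Int)
    · have htn : p.1.toNat = i := by omega
      have hstep : fosStep t n b p =
          if (p.2 - t).natAbs < ((b.getD i 0) - t).natAbs then b.set i p.2 else b := by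
        unfold fosStep
        rw [htn]
        by_cases hc : (p.2 - t).natAbs < ((b.getD i 0) - t).natAbs
        · rw [if_pos ⟨by omega, by omega, hc⟩, if_pos hc]
        · rw [if_neg (by tauto), if_neg hc]
      have hfil : ((p :: L).filter (fun q => q.1 == (i : Int))).map Prod.snd =
          p.2 :: (L.filter (fun q => q.1 == (i : Int))).map Prod.snd := by
        simp [hp]
      rw [hstep, hfil]
      by_cases hc : (p.2 - t).natAbs < ((b.getD i 0) - t).natAbs
      · rw [if_pos hc]
        rw [ih (b.set i p.2) (by simpa using hb)]
        have : (b.set i p.2).getD i 0 = p.2 := by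
          simp [List.getD_eq_getElem?_getD, hb]
        rw [this, fosMin, if_pos hc]
      · rw [if_neg hc, ih b hb, fosMin, if_neg hc]
    · have hfil : ((p :: L).filter (fun q => q.1 == (i : Int))) =
          L.filter (fun q => q.1 == (i : Int)) := by
        simp [hp]
      have hgd : (fosStep t n b p).getD i 0 = b.getD i 0 := by
        unfold fosStep
        split
        · next h =>
          have : p.1.toNat ≠ i := by omega
          simp [List.getD_eq_getElem?_getD, List.getElem?_set_ne this]
        · rfl
      have hlen : i < (fosStep t n b p).length := by
        unfold fosStep; split <;> simpa using hb
      rw [ih (fosStep t n b p) hlen, hgd, hfil]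

theorem find_optimal_states_spec : Claim_equal_find_optimal_states := by
  intro n states dx dy t _ hpre
  unfold Spec_find_optimal_states find_optimal_states find_optimal_states_alt
  rw [fos_foldl_append]
  refine Prod.ext (by simp) ?_
  simp only [List.nil_append]
  set L := dx.zip dy with hL
  set g := fun i => fosMin t (PySem.List.pyGetD states i 0)
      ((L.filter (fun p => p.1 == i)).map Prod.snd) with hg
  set b0 := (PySem.List.pyRange 0 n 1).map (fun i => PySem.List.pyGetD states i 0) with hb0
  have hlenb0 : b0.length = n.toNat := by
    simp [hb0, PySem.List.length_pyRange_one]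
  apply List.ext_getElem
  · simp [fosStep_length, hlenb0, PySem.List.length_pyRange_one]
  · intro k h1 h2
    have hk : k < n.toNat := by simpa [PySem.List.length_pyRange_one] using h1
    have hkn : (k : Int) < n := by omega
    have hlen : k < (L.foldl (fosStep t n) b0).length := by
      rw [fosStep_length, hlenb0]; exact hk
    have hrange : (PySem.List.pyRange 0 n 1)[k]'(by simpa [PySem.List.length_pyRange_one] using hk) = (k : Int) := by
      rw [PySem.List.getElem_pyRange_one]; simp
    have hb0k : b0.getD k 0 = PySem.List.pyGetD states (k : Int) 0 := by
      rw [List.getD_eq_getElem?_getD, hb0, List.getElem?_map]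
      rw [List.getElem?_eq_getElem (by simpa [PySem.List.length_pyRange_one] using hk)]
      simp [hrange]
    have hA : ((PySem.List.pyRange 0 n 1).map g)[k] = g (k : Int) := by
      rw [List.getElem_map, hrange]
    rw [hA]
    have hB : (L.foldl (fosStep t n) b0)[k] = (L.foldl (fosStep t n) b0).getD k 0 := by
      rw [List.getD_eq_getElem?_getD, List.getElem?_eq_getElem hlen]; rfl
    rw [hB, fosStep_getD t n L b0 k (by omega) hkn, hb0k]
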